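-- pv_equiv track=rewrite | github.com/inhanp/Python_program | programming/programming17.py | listFilter
-- ===== SOURCE A (Python) =====
-- def listFilter(val):
--     '''
--     Create a list that contains the square of all numbers between 1 and 100 (i.e., [1,4,9,16,...]).
--     Then, using the val parameter passed into this function, return the number of items in your
--     list that are smaller than val.
--     '''
--     list = []
--     for num in range(1, 101):
--         list.append(num**2)
--
--     result = 0
--
--     for item in list:
--         if item < val:
--             result += 1
--
--     return result
-- ===== SOURCE B (Python) =====
-- def listFilter(val):
--     # The squares 1^2..100^2 are strictly increasing, so the number of them
--     # below val equals the largest n in [0,100] with n*n < val (0 if none).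
--     # Binary search for that n instead of building and scanning the list.
--     lo, hi = 0, 100
--     while lo < hi:
--         mid = (lo + hi + 1) // 2
--         if mid * mid < val:
--             lo = mid
--         else:
--             hi = mid - 1
--     return lo
-- ===== Notes on version B (the rewrite author's own statement) =====
-- stated objective: alternative
-- what changed: Replaces building the 100-element list of squares and linearly counting those below val with a binary search for the largest n with n*n < val over the fixed range 0..100.
import Mathlib
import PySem

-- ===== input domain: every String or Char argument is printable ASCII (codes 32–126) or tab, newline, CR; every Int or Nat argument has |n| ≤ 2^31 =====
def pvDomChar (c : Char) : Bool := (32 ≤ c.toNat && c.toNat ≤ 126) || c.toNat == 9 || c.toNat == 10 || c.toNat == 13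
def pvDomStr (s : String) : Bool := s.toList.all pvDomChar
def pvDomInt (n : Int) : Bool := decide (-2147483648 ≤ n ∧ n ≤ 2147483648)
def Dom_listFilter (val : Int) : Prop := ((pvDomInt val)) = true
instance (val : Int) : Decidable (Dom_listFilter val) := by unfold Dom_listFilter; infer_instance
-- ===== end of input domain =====

-- B replaces A's build-a-list-of-100-squares-and-scan with a binary search for the
-- largest n with n*n < val over the fixed range 0..100 (objective: alternative algorithm).

-- ===== PORT A =====
def listFilter (val : Int) : Int :=
  let list := (PySem.List.pyRange 1 101 1).foldl (fun acc num => acc ++ [num ^ 2]) ([] : List Int)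
  list.foldl (fun result item => if item < val then result + 1 else result) 0

-- ===== PORT B =====
-- midpoint bounds used by the loop's termination proof
theorem pvMid_bounds (lo hi : Int) (h : lo < hi) :
    lo + 1 ≤ PySem.Int.floordiv (lo + hi + 1) 2 ∧ PySem.Int.floordiv (lo + hi + 1) 2 ≤ hi := by
  have h2 := PySem.Int.floordiv_two_mid_bounds (lo := lo + 1) (hi := hi) (by omega)
  have : lo + 1 + hi = lo + hi + 1 := by ring
  rw [this] at h2
  exact h2

def pvBSLoop (val lo hi : Int) : Int :=
  if h : lo < hi then
    let mid := PySem.Int.floordiv (lo + hi + 1) 2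
    if mid * mid < val then pvBSLoop val mid hi
    else pvBSLoop val lo (mid - 1)
  else lo
termination_by (hi - lo).toNat
decreasing_by
  · have := pvMid_bounds lo hi h; omega
  · have := pvMid_bounds lo hi h; omega

def listFilter_alt (val : Int) : Int := pvBSLoop val 0 100

-- ===== PRECONDITION & SPEC =====
def Spec_listFilter (val : Int) (out : Int) : Prop := out = listFilter_alt val
instance (val : Int) (out : Int) : Decidable (Spec_listFilter val out) := by unfold Spec_listFilter; infer_instance

-- ===== CLAIM (what is proved, stated in full; the proofs are below) =====
def Claim_equal_listFilter : Prop := ∀ (val : Int), Dom_listFilter val → Spec_listFilter val (listFilter val)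

-- ===== LEMMAS AND PROOFS =====

-- A's first loop builds init ++ map f l
theorem pv_foldl_append_map (f : Int → Int) :
    ∀ (l : List Int) (init : List Int),
      l.foldl (fun acc n => acc ++ [f n]) init = init ++ l.map f := by
  intro l
  induction l with
  | nil => simp
  | cons a t ih => intro init; simp [List.foldl, ih]

-- A's second loop is a countP
theorem pv_foldl_count (val : Int) :
    ∀ (l : List Int) (init : Int),
      l.foldl (fun result item => if item < val then result + 1 else result) init
        = init + (l.countP (fun i => decide (i < val)) : Int) := by
  intro l
  induction l with
  | nil => simp
  | cons a t ih =>
    intro init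
    by_cases h : a < val <;> simp [List.foldl, h, ih]; ring

-- counting a downward-closed predicate over range 1..100 gives the break point r
theorem pv_count_eq (val r : Int) (hr0 : 0 ≤ r) (hr1 : r ≤ 100)
    (H1 : ∀ n : Int, 1 ≤ n → n ≤ r → n * n < val)
    (H2 : ∀ n : Int, r < n → n ≤ 100 → ¬ n * n < val) :
    ((PySem.List.pyRange 1 101 1).countP (fun n => decide (n ^ 2 < val)) : Int) = r := by
  have hsplit : PySem.List.pyRange 1 101 1
      = PySem.List.pyRange 1 (r + 1) 1 ++ PySem.List.pyRange (r + 1) 101 1 :=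
    PySem.List.pyRange_one_append 1 (r + 1) 101 (by omega) (by omega)
  rw [hsplit, List.countP_append]
  have hall : (PySem.List.pyRange 1 (r + 1) 1).countP (fun n => decide (n ^ 2 < val))
      = (PySem.List.pyRange 1 (r + 1) 1).length := by
    rw [List.countP_eq_length]
    intro n hn
    rw [PySem.List.mem_pyRange_one] at hn
    have := H1 n hn.1 (by omega)
    simp [pow_two]
    linarith
  have hnone : (PySem.List.pyRange (r + 1) 101 1).countP (fun n => decide (n ^ 2 < val)) = 0 := by
    rw [List.countP_eq_zero]
    intro n hn
    rw [PySem.List.mem_pyRange_one] at hn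
    have := H2 n (by omega) (by omega)
    simp [pow_two]
    linarith
  rw [hall, hnone, PySem.List.length_pyRange_one]
  omega

-- the binary-search loop invariant
theorem pvBSLoop_spec (val : Int) :
    ∀ (fuel : Nat) (lo hi : Int), (hi - lo).toNat ≤ fuel →
      0 ≤ lo → lo ≤ hi → hi ≤ 100 →
      (lo = 0 ∨ lo * lo < val) →
      (∀ n : Int, hi < n → n ≤ 100 → ¬ n * n < val) →
      (0 ≤ pvBSLoop val lo hi ∧ pvBSLoop val lo hi ≤ 100)
      ∧ (pvBSLoop val lo hi = 0 ∨ pvBSLoop val lo hi * pvBSLoop val lo hi < val)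
      ∧ (∀ n : Int, pvBSLoop val lo hi < n → n ≤ 100 → ¬ n * n < val) := by
  intro fuel
  induction fuel with
  | zero =>
    intro lo hi hf h0 hlh hh hP hN
    have heq : lo = hi := by omega
    rw [pvBSLoop, dif_neg (by omega)]
    subst heq
    exact ⟨⟨h0, hh⟩, hP, hN⟩
  | succ k ih =>
    intro lo hi hf h0 hlh hh hP hN
    by_cases hlt : lo < hi
    · have hm := pvMid_bounds lo hi hlt
      rw [pvBSLoop]
      simp only [hlt, dite_true]
      set mid := PySem.Int.floordiv (lo + hi + 1) 2 with hmid
      by_cases hc : mid * mid < val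
      · simp only [hc, if_true]
        exact ih mid hi (by omega) (by omega) (by omega) hh (Or.inr hc) hN
      · simp only [hc, if_false]
        refine ih lo (mid - 1) (by omega) h0 (by omega) (by omega) hP ?_
        intro n hn hn100
        by_cases hnh : n ≤ hi
        · intro hcon
          apply hc
          have hmn : mid ≤ n := by omega
          have : mid * mid ≤ n * n := by nlinarith
          linarith
        · exact hN n (by omega) hn100
    · have heq : lo = hi := by omega
      rw [pvBSLoop, dif_neg (by omega)]
      subst heq
      exact ⟨⟨h0, hh⟩, hP, hN⟩

-- ===== VERDICT (by name: the statement is the Claim_ definition above) =====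
theorem listFilter_spec : Claim_equal_listFilter := by
  intro val _
  unfold Spec_listFilter listFilter listFilter_alt
  simp only
  rw [pv_foldl_append_map, List.nil_append, pv_foldl_count, List.countP_map]
  have hspec := pvBSLoop_spec val 100 0 100 (le_refl _) (by omega) (by omega)
      (by omega) (Or.inl rfl) (by intro n h1 h2 _; omega)
  set r := pvBSLoop val 0 100 with hr
  obtain ⟨⟨hr0, hr1⟩, hP, hN⟩ := hspec
  have hcount : ((PySem.List.pyRange 1 101 1).countP
      (fun n => decide (n ^ 2 < val)) : Int) = r := by
    apply pv_count_eq val r hr0 hr1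
    · intro n h1n hnr
      rcases hP with h | h
      · omega
      · have : n * n ≤ r * r := by nlinarith
        linarith
    · exact hN
  simp only [Function.comp_def, zero_add]
  exact hcount
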